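-- pv_equiv track=rewrite | github.com/AleksandrKozyrnovD/BMSTU_AA | lab_1/src/lsht.py | lvsh_dynamic
-- ===== SOURCE A (Python) =====
-- def lvsh_matrix_min(matrix, i, j):
--     return min(matrix[i - 1][j], matrix[i][j - 1], matrix[i - 1][j - 1])
--
-- def lvsh_dynamic(string1 : str, string2 : str):
--     lenstr1 = len(string1)
--     lenstr2 = len(string2)
--     if lenstr1 == 0:
--         return lenstr2
--     if lenstr2 == 0:
--         return lenstr1
--
--     matrix = [[0 for _ in range(lenstr2 + 1)] for _ in range(lenstr1 + 1)]
--     for i in range(1, lenstr1 + 1):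
--         matrix[i][0] = i
--     for j in range(1, lenstr2 + 1):
--         matrix[0][j] = j
--
--     for i in range(lenstr1):
--         for j in range(lenstr2):
--             if string1[i] == string2[j]:
--                 matrix[i + 1][j + 1] = lvsh_matrix_min(matrix, i + 1, j + 1)
--             else:
--                 matrix[i + 1][j + 1] = lvsh_matrix_min(matrix, i + 1, j + 1) + 1
--
--     test = min(lenstr1, lenstr2)
--     return matrix[test][test] + abs(lenstr1 - lenstr2)
-- ===== SOURCE B (Python) =====
-- def lvsh_dynamic(string1: str, string2: str):
--     m = min(len(string1), len(string2))
--     memo = {}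
--
--     def d(i, j):
--         if i == 0:
--             return j
--         if j == 0:
--             return i
--         if (i, j) in memo:
--             return memo[(i, j)]
--         best = min(d(i - 1, j), d(i, j - 1), d(i - 1, j - 1))
--         res = best if string1[i - 1] == string2[j - 1] else best + 1
--         memo[(i, j)] = res
--         return res
--
--     return d(m, m) + abs(len(string1) - len(string2))
-- ===== Notes on version B (the rewrite author's own statement) =====
-- stated objective: alternative
-- what changed: B replaces A's bottom-up fully materialised (len1+1)x(len2+1) matrix with three initialisation passes and nested fill loops by top-down recursion on (i,j) with an explicit memo dictionary, starting from the single needed cell (m,m) with m = min length, plus the length-difference correction.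
import Mathlib
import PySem

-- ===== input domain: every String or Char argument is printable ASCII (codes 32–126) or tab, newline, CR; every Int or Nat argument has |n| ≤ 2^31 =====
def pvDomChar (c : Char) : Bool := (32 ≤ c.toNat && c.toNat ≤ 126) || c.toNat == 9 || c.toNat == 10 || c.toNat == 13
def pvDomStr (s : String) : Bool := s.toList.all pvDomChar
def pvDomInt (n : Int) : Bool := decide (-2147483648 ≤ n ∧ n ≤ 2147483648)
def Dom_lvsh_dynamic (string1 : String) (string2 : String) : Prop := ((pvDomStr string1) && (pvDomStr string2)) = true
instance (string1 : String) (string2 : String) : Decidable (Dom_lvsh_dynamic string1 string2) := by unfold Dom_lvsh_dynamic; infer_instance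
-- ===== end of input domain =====

-- B replaces A's bottom-up fully materialised (len1+1)×(len2+1) matrix (three initialisation
-- passes + nested fill loops) by top-down recursion on (i, j) with an explicit memo dictionary,
-- starting from the single needed cell (m, m), m = min length (objective: alternative).

-- ===== PORT A =====
-- matrix[i][j] read/written with Python semantics; every index A uses is in range, so the defaults are never hit
def pvMget (matrix : List (List Int)) (i j : Int) : Int :=
  PySem.List.pyGetD (PySem.List.pyGetD matrix i []) j 0

def pvMset (matrix : List (List Int)) (i j : Int) (v : Int) : List (List Int) :=
  PySem.List.pySetD matrix i (PySem.List.pySetD (PySem.List.pyGetD matrix i []) j v)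

def lvsh_matrix_min (matrix : List (List Int)) (i j : Int) : Int :=
  min (min (pvMget matrix (i-1) j) (pvMget matrix i (j-1))) (pvMget matrix (i-1) (j-1))

def lvsh_dynamic (string1 : String) (string2 : String) : Int :=
  let s1 := string1.toList
  let s2 := string2.toList
  let lenstr1 : Int := s1.length
  let lenstr2 : Int := s2.length
  if lenstr1 = 0 then lenstr2
  else if lenstr2 = 0 then lenstr1
  else
    let matrix := (PySem.List.pyRange 0 (lenstr1+1) 1).map
      (fun _ => (PySem.List.pyRange 0 (lenstr2+1) 1).map (fun _ => (0 : Int)))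
    let matrix := (PySem.List.pyRange 1 (lenstr1+1) 1).foldl (fun m i => pvMset m i 0 i) matrix
    let matrix := (PySem.List.pyRange 1 (lenstr2+1) 1).foldl (fun m j => pvMset m 0 j j) matrix
    let matrix := (PySem.List.pyRange 0 lenstr1 1).foldl (fun m i =>
      (PySem.List.pyRange 0 lenstr2 1).foldl (fun m j =>
        if PySem.List.pyGetD s1 i ' ' = PySem.List.pyGetD s2 j ' '
        then pvMset m (i+1) (j+1) (lvsh_matrix_min m (i+1) (j+1))
        else pvMset m (i+1) (j+1) (lvsh_matrix_min m (i+1) (j+1) + 1)) m) matrix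
    let test := min lenstr1 lenstr2
    pvMget matrix test test + |lenstr1 - lenstr2|

-- ===== PORT B =====
-- the inner 'def d(i, j)' of Source B: the memo dict is threaded explicitly (Python mutates the
-- closure's dict); indices are the Nats 0..m, so the keys are Nat pairs
def pvMemoD (s1 s2 : List Char) (i j : Nat) (memo : PySem.Dict (Nat × Nat) Int) :
    Int × PySem.Dict (Nat × Nat) Int :=
  if i = 0 then ((j : Int), memo)
  else if j = 0 then ((i : Int), memo)
  else
    match memo.get? (i, j) with
    | some v => (v, memo)
    | none =>
      let r1 := pvMemoD s1 s2 (i-1) j memo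
      let r2 := pvMemoD s1 s2 i (j-1) r1.2
      let r3 := pvMemoD s1 s2 (i-1) (j-1) r2.2
      let best := min (min r1.1 r2.1) r3.1
      let res := if s1.getD (i-1) ' ' = s2.getD (j-1) ' ' then best else best + 1
      (res, r3.2.insert (i, j) res)
  termination_by (i, j)
  decreasing_by
  · apply Prod.Lex.left; omega
  · apply Prod.Lex.right'; omega; omega
  · apply Prod.Lex.left; omega

def lvsh_dynamic_alt (string1 : String) (string2 : String) : Int :=
  let s1 := string1.toList
  let s2 := string2.toList
  let m := min s1.length s2.length
  (pvMemoD s1 s2 m m PySem.Dict.empty).1 + |(s1.length : Int) - (s2.length : Int)|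

-- ===== PRECONDITION & SPEC =====
def Spec_lvsh_dynamic (string1 : String) (string2 : String) (out : Int) : Prop := out = lvsh_dynamic_alt string1 string2
instance (string1 : String) (string2 : String) (out : Int) : Decidable (Spec_lvsh_dynamic string1 string2 out) := by unfold Spec_lvsh_dynamic; infer_instance

-- ===== CLAIM (what is proved, stated in full; the proofs are below) =====
def Claim_equal_lvsh_dynamic : Prop := ∀ (string1 : String) (string2 : String), Dom_lvsh_dynamic string1 string2 → Spec_lvsh_dynamic string1 string2 (lvsh_dynamic string1 string2)

-- ===== LEMMAS AND PROOFS =====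
-- pvD is the recurrence BOTH programs fill in (note: the match case also takes the minimum over
-- all three neighbours, exactly as A's lvsh_matrix_min does — this is A's behaviour, reproduced).
def pvD (s1 s2 : List Char) : Nat → Nat → Int
  | 0, j => (j : Int)
  | i+1, 0 => ((i : Int) + 1)
  | i+1, j+1 =>
    let best := min (min (pvD s1 s2 i (j+1)) (pvD s1 s2 (i+1) j)) (pvD s1 s2 i j)
    if s1.getD i ' ' = s2.getD j ' ' then best else best + 1
  termination_by i j => (i, j)

theorem pvD_zero_right (s1 s2 : List Char) (i : Nat) : pvD s1 s2 i 0 = (i : Int) := by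
  cases i
  · rw [pvD]
  · rw [pvD]; push_cast; ring

theorem pvD_zero_left (s1 s2 : List Char) (j : Nat) : pvD s1 s2 0 j = (j : Int) := by
  cases j <;> rw [pvD]

theorem set_map_range {α : Type} (f : Nat → α) (n k : Nat) (v : α) (h : k < n) :
    ((List.range n).map f).set k v = (List.range n).map (fun x => if x = k then v else f x) := by
  apply List.ext_getElem (by simp)
  intro idx h1 h2
  simp only [List.length_set, List.length_map, List.length_range] at h1
  by_cases hik : idx = k
  · subst hik; simp [List.getElem_set]
  · rw [List.getElem_set_ne (by omega)]
    simp [hik]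

theorem getD_map_range {α : Type} (f : Nat → α) (n k : Nat) (d : α) (h : k < n) :
    ((List.range n).map f).getD k d = f k := by
  simp [List.getD, h]

def pvMk (n1 n2 : Nat) (F : Nat → Nat → Int) : List (List Int) :=
  (List.range (n1+1)).map (fun a => (List.range (n2+1)).map (fun b => F a b))

theorem pvMget_mk {n1 n2 : Nat} (F : Nat → Nat → Int) (a b : Nat) (ha : a ≤ n1) (hb : b ≤ n2) :
    pvMget (pvMk n1 n2 F) (a : Int) (b : Int) = F a b := by
  unfold pvMget pvMk
  rw [PySem.List.pyGetD_natCast, PySem.List.pyGetD_natCast,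
    getD_map_range _ _ _ _ (Nat.lt_succ_of_le ha), getD_map_range _ _ _ _ (Nat.lt_succ_of_le hb)]

theorem pvMset_mk {n1 n2 : Nat} (F : Nat → Nat → Int) (a b : Nat) (v : Int)
    (ha : a ≤ n1) (hb : b ≤ n2) :
    pvMset (pvMk n1 n2 F) (a : Int) (b : Int) v
      = pvMk n1 n2 (fun x y => if x = a ∧ y = b then v else F x y) := by
  unfold pvMset pvMk
  rw [PySem.List.pyGetD_natCast, PySem.List.pySetD_natCast, PySem.List.pySetD_natCast,
    getD_map_range _ _ _ _ (Nat.lt_succ_of_le ha),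
    set_map_range _ _ _ _ (Nat.lt_succ_of_le hb),
    set_map_range _ _ _ _ (Nat.lt_succ_of_le ha)]
  apply List.map_congr_left
  intro x hx
  simp only [List.mem_range, Nat.lt_succ_iff] at hx
  by_cases hxa : x = a
  · subst hxa
    simp only [if_pos rfl]
    apply List.map_congr_left
    intro y _
    by_cases hyb : y = b <;> simp [hyb]
  · simp only [if_neg hxa]
    apply List.map_congr_left
    intro y _
    simp [hxa]

theorem pvMk_congr {n1 n2 : Nat} {F G : Nat → Nat → Int}
    (h : ∀ a ≤ n1, ∀ b ≤ n2, F a b = G a b) : pvMk n1 n2 F = pvMk n1 n2 G := by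
  unfold pvMk
  apply List.map_congr_left
  intro a ha
  simp only [List.mem_range, Nat.lt_succ_iff] at ha
  apply List.map_congr_left
  intro b hb
  simp only [List.mem_range, Nat.lt_succ_iff] at hb
  exact h a ha b hb

def pvC1 (n1 k : Nat) (a b : Nat) : Int := if b = 0 ∧ 1 ≤ a ∧ a ≤ k then (a : Int) else 0

theorem pv_init_mat (n1 n2 : Nat) :
    (PySem.List.pyRange 0 ((n1 : Int)+1) 1).map
        (fun _ => (PySem.List.pyRange 0 ((n2 : Int)+1) 1).map (fun _ => (0 : Int)))
      = pvMk n1 n2 (fun _ _ => 0) := by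
  unfold pvMk
  rw [List.map_const', List.map_const', List.map_const', List.map_const']
  simp [PySem.List.length_pyRange_one]

theorem pv_init1 (s1 s2 : List Char) (n1 n2 : Nat) (k : Nat) (hk : k ≤ n1) :
    (PySem.List.pyRange 1 ((k : Int)+1) 1).foldl (fun m i => pvMset m i 0 i)
        (pvMk n1 n2 (fun _ _ => 0))
      = pvMk n1 n2 (pvC1 n1 k) := by
  induction k with
  | zero =>
    rw [PySem.List.pyRange_one_eq_nil (by norm_num)]
    simp only [List.foldl_nil]
    apply pvMk_congr
    intro a _ b _
    simp [pvC1]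
    omega
  | succ k ih =>
    have hk' : k ≤ n1 := by omega
    have hsplit : PySem.List.pyRange 1 (((k+1 : Nat) : Int)+1) 1
        = PySem.List.pyRange 1 ((k : Int)+1) 1 ++ [(k : Int)+1] := by
      push_cast
      exact PySem.List.pyRange_one_succ_right (by omega)
    rw [hsplit, List.foldl_append, ih hk']
    simp only [List.foldl_cons, List.foldl_nil]
    have hcast : ((k : Int)+1) = (((k+1 : Nat)) : Int) := by push_cast; ring
    rw [hcast]
    have h0 : ((0 : Nat) : Int) = (0 : Int) := rfl
    rw [← h0, pvMset_mk _ _ _ _ (by omega) (by omega)]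
    apply pvMk_congr
    intro a _ b _
    by_cases hab : a = k+1 ∧ b = 0
    · simp [hab, pvC1]
    · rw [if_neg hab]
      simp only [pvC1]
      by_cases hc : b = 0 ∧ 1 ≤ a ∧ a ≤ k
      · rw [if_pos hc, if_pos (by omega)]
      · rw [if_neg hc, if_neg (by omega)]

def pvS (s1 s2 : List Char) (i : Nat) (a b : Nat) : Int :=
  if a ≤ i ∨ b = 0 then pvD s1 s2 a b else 0

def pvT (s1 s2 : List Char) (i j : Nat) (a b : Nat) : Int :=
  if a ≤ i ∨ b = 0 ∨ (a = i + 1 ∧ b ≤ j) then pvD s1 s2 a b else 0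

theorem pv_init2 (s1 s2 : List Char) (n1 n2 : Nat) (k : Nat) (hk : k ≤ n2) :
    (PySem.List.pyRange 1 ((k : Int)+1) 1).foldl (fun m j => pvMset m 0 j j)
        (pvMk n1 n2 (pvC1 n1 n1))
      = pvMk n1 n2 (fun a b => if a = 0 ∧ b ≤ k then (b : Int) else pvC1 n1 n1 a b) := by
  induction k with
  | zero =>
    rw [PySem.List.pyRange_one_eq_nil (by norm_num)]
    simp only [List.foldl_nil]
    apply pvMk_congr
    intro a _ b _
    by_cases hc : a = 0 ∧ b ≤ 0
    · rw [if_pos hc]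
      simp [pvC1, hc.1, Nat.le_zero.mp hc.2]
    · rw [if_neg hc]
  | succ k ih =>
    have hk' : k ≤ n2 := by omega
    have hsplit : PySem.List.pyRange 1 (((k+1 : Nat) : Int)+1) 1
        = PySem.List.pyRange 1 ((k : Int)+1) 1 ++ [(k : Int)+1] := by
      push_cast
      exact PySem.List.pyRange_one_succ_right (by omega)
    rw [hsplit, List.foldl_append, ih hk']
    simp only [List.foldl_cons, List.foldl_nil]
    have hcast : ((k : Int)+1) = (((k+1 : Nat)) : Int) := by push_cast; ring
    rw [hcast]
    have h0 : ((0 : Nat) : Int) = (0 : Int) := rfl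
    rw [← h0, pvMset_mk _ _ _ _ (by omega) (by omega)]
    apply pvMk_congr
    intro a _ b _
    by_cases hab : a = 0 ∧ b = k+1
    · simp [hab]
    · rw [if_neg hab]
      by_cases hc : a = 0 ∧ b ≤ k
      · rw [if_pos hc, if_pos (by omega)]
      · rw [if_neg hc, if_neg (by omega)]

theorem pvA_init (s1 s2 : List Char) (n1 n2 : Nat) :
    ((PySem.List.pyRange 1 ((n2 : Int)+1) 1).foldl (fun m j => pvMset m 0 j j)
      ((PySem.List.pyRange 1 ((n1 : Int)+1) 1).foldl (fun m i => pvMset m i 0 i)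
        ((PySem.List.pyRange 0 ((n1 : Int)+1) 1).map
          (fun _ => (PySem.List.pyRange 0 ((n2 : Int)+1) 1).map (fun _ => (0 : Int))))))
    = pvMk n1 n2 (pvS s1 s2 0) := by
  rw [pv_init_mat, pv_init1 s1 s2 n1 n2 n1 le_rfl, pv_init2 s1 s2 n1 n2 n2 le_rfl]
  apply pvMk_congr
  intro a ha b hb
  unfold pvS pvC1
  by_cases ha0 : a = 0
  · subst ha0
    rw [if_pos ⟨rfl, hb⟩, if_pos (by omega), pvD_zero_left]
  · by_cases hb0 : b = 0
    · subst hb0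
      rw [if_neg (by omega), if_pos (by omega), if_pos (by omega), pvD_zero_right]
    · rw [if_neg (by omega), if_neg (by omega), if_neg (by omega)]

theorem pvD_succ_succ (s1 s2 : List Char) (i j : Nat) :
    pvD s1 s2 (i+1) (j+1) =
      (if s1.getD i ' ' = s2.getD j ' '
       then min (min (pvD s1 s2 i (j+1)) (pvD s1 s2 (i+1) j)) (pvD s1 s2 i j)
       else min (min (pvD s1 s2 i (j+1)) (pvD s1 s2 (i+1) j)) (pvD s1 s2 i j) + 1) := by
  rw [pvD]

theorem pvA_inner (s1 s2 : List Char) (n1 n2 i : Nat) (hi : i < n1) (t : Nat) (ht : t ≤ n2) :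
    (PySem.List.pyRange 0 (t : Int) 1).foldl (fun m j =>
        if PySem.List.pyGetD s1 (i : Int) ' ' = PySem.List.pyGetD s2 j ' '
        then pvMset m ((i : Int)+1) (j+1) (lvsh_matrix_min m ((i : Int)+1) (j+1))
        else pvMset m ((i : Int)+1) (j+1) (lvsh_matrix_min m ((i : Int)+1) (j+1) + 1))
      (pvMk n1 n2 (pvS s1 s2 i))
    = pvMk n1 n2 (pvT s1 s2 i t) := by
  induction t with
  | zero =>
    rw [PySem.List.pyRange_one_eq_nil (by norm_num)]
    simp only [List.foldl_nil]
    apply pvMk_congr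
    intro a _ b _
    unfold pvS pvT
    by_cases hc : a ≤ i ∨ b = 0
    · rw [if_pos hc, if_pos (by omega)]
    · rw [if_neg hc, if_neg (by omega)]
  | succ t ih =>
    have ht' : t ≤ n2 := by omega
    have hsplit : PySem.List.pyRange 0 ((t+1 : Nat) : Int) 1
        = PySem.List.pyRange 0 (t : Int) 1 ++ [(t : Int)] := by
      push_cast
      exact PySem.List.pyRange_one_succ_right (by omega)
    rw [hsplit, List.foldl_append, ih ht']
    simp only [List.foldl_cons, List.foldl_nil]
    have e1 : ((i : Int) + 1 - 1) = ((i : Nat) : Int) := by ring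
    have e2 : ((t : Int) + 1 - 1) = ((t : Nat) : Int) := by ring
    have e3 : ((i : Int) + 1) = (((i+1 : Nat)) : Int) := by push_cast; ring
    have e4 : ((t : Int) + 1) = (((t+1 : Nat)) : Int) := by push_cast; ring
    have hmm : lvsh_matrix_min (pvMk n1 n2 (pvT s1 s2 i t)) ((i : Int)+1) ((t : Int)+1)
        = min (min (pvD s1 s2 i (t+1)) (pvD s1 s2 (i+1) t)) (pvD s1 s2 i t) := by
      unfold lvsh_matrix_min
      rw [e1, e2]
      rw [show ((i : Int) + 1) = (((i+1 : Nat)) : Int) from e3,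
          show ((t : Int) + 1) = (((t+1 : Nat)) : Int) from e4]
      rw [pvMget_mk _ _ _ (by omega) (by omega), pvMget_mk _ _ _ (by omega) (by omega),
          pvMget_mk _ _ _ (by omega) (by omega)]
      unfold pvT
      rw [if_pos (by omega), if_pos (by omega), if_pos (by omega)]
    have hchar : (PySem.List.pyGetD s1 (i : Int) ' ' = PySem.List.pyGetD s2 (t : Int) ' ')
        ↔ (s1.getD i ' ' = s2.getD t ' ') := by
      rw [PySem.List.pyGetD_natCast, PySem.List.pyGetD_natCast]
    have hset : ∀ v : Int, pvMset (pvMk n1 n2 (pvT s1 s2 i t)) ((i : Int)+1) ((t : Int)+1) v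
        = pvMk n1 n2 (fun x y => if x = i+1 ∧ y = t+1 then v else pvT s1 s2 i t x y) := by
      intro v
      rw [e3, e4, pvMset_mk _ _ _ _ (by omega) (by omega)]
    by_cases hc : s1.getD i ' ' = s2.getD t ' '
    · rw [if_pos (hchar.mpr hc), hmm, hset]
      apply pvMk_congr
      intro a _ b _
      by_cases hab : a = i+1 ∧ b = t+1
      · rw [if_pos hab]
        unfold pvT
        rw [if_pos (by omega), hab.1, hab.2, pvD_succ_succ, if_pos hc]
      · rw [if_neg hab]
        unfold pvT
        by_cases hd : a ≤ i ∨ b = 0 ∨ (a = i + 1 ∧ b ≤ t)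
        · rw [if_pos hd, if_pos (by omega)]
        · rw [if_neg hd, if_neg (by omega)]
    · rw [if_neg (fun h => hc (hchar.mp h)), hmm, hset]
      apply pvMk_congr
      intro a _ b _
      by_cases hab : a = i+1 ∧ b = t+1
      · rw [if_pos hab]
        unfold pvT
        rw [if_pos (by omega), hab.1, hab.2, pvD_succ_succ, if_neg hc]
      · rw [if_neg hab]
        unfold pvT
        by_cases hd : a ≤ i ∨ b = 0 ∨ (a = i + 1 ∧ b ≤ t)
        · rw [if_pos hd, if_pos (by omega)]
        · rw [if_neg hd, if_neg (by omega)]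

theorem pvA_outer (s1 s2 : List Char) (n1 n2 : Nat) (k : Nat) (hk : k ≤ n1) :
    (PySem.List.pyRange 0 (k : Int) 1).foldl (fun m i =>
      (PySem.List.pyRange 0 (n2 : Int) 1).foldl (fun m j =>
        if PySem.List.pyGetD s1 i ' ' = PySem.List.pyGetD s2 j ' '
        then pvMset m (i+1) (j+1) (lvsh_matrix_min m (i+1) (j+1))
        else pvMset m (i+1) (j+1) (lvsh_matrix_min m (i+1) (j+1) + 1)) m)
      (pvMk n1 n2 (pvS s1 s2 0))
    = pvMk n1 n2 (pvS s1 s2 k) := by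
  induction k with
  | zero =>
    rw [PySem.List.pyRange_one_eq_nil (b := ((0:Nat):Int)) (by norm_num)]
    simp only [List.foldl_nil]
  | succ k ih =>
    have hk' : k ≤ n1 := by omega
    have hsplit : PySem.List.pyRange 0 ((k+1 : Nat) : Int) 1
        = PySem.List.pyRange 0 (k : Int) 1 ++ [(k : Int)] := by
      push_cast
      exact PySem.List.pyRange_one_succ_right (by omega)
    rw [hsplit, List.foldl_append, ih hk']
    simp only [List.foldl_cons, List.foldl_nil]
    rw [pvA_inner s1 s2 n1 n2 k (by omega) n2 le_rfl]
    apply pvMk_congr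
    intro a _ b hb
    unfold pvS pvT
    by_cases hd : a ≤ k ∨ b = 0 ∨ (a = k + 1 ∧ b ≤ n2)
    · rw [if_pos hd, if_pos (by omega)]
    · rw [if_neg hd, if_neg (by omega)]

theorem pvA_eq (string1 string2 : String) :
    lvsh_dynamic string1 string2
      = pvD string1.toList string2.toList
          (min string1.toList.length string2.toList.length)
          (min string1.toList.length string2.toList.length)
        + |(string1.toList.length : Int) - (string2.toList.length : Int)| := by
  simp only [lvsh_dynamic]
  by_cases h1 : (string1.toList.length : Int) = 0
  · rw [if_pos h1]
    have hn1 : string1.toList.length = 0 := by exact_mod_cast h1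
    rw [hn1]
    simp only [Nat.zero_min]
    rw [pvD_zero_left]
    push_cast
    rw [zero_sub, abs_neg, abs_of_nonneg (by positivity)]
    ring
  · rw [if_neg h1]
    by_cases h2 : (string2.toList.length : Int) = 0
    · rw [if_pos h2]
      have hn2 : string2.toList.length = 0 := by exact_mod_cast h2
      rw [hn2]
      simp only [Nat.min_zero]
      rw [pvD_zero_right]
      push_cast
      rw [sub_zero, abs_of_nonneg (by positivity)]
      ring
    · rw [if_neg h2]
      rw [pvA_init string1.toList string2.toList string1.toList.length string2.toList.length]
      rw [pvA_outer string1.toList string2.toList string1.toList.length string2.toList.length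
            string1.toList.length le_rfl]
      have hmin : min ((string1.toList.length : Nat) : Int) ((string2.toList.length : Nat) : Int)
          = ((min string1.toList.length string2.toList.length : Nat) : Int) := by
        push_cast; ring
      rw [hmin, pvMget_mk _ _ _ (Nat.min_le_left _ _) (Nat.min_le_right _ _)]
      unfold pvS
      rw [if_pos (Or.inl (Nat.min_le_left _ _))]

-- B-side: the memoised recursion computes pvD and keeps the memo sound
theorem pvMemoD_sound (s1 s2 : List Char) : ∀ (n i j : Nat) (memo : PySem.Dict (Nat × Nat) Int),
    i + j ≤ n →
    (∀ a b v, memo.get? (a, b) = some v → v = pvD s1 s2 a b) →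
    (pvMemoD s1 s2 i j memo).1 = pvD s1 s2 i j ∧
    (∀ a b v, (pvMemoD s1 s2 i j memo).2.get? (a, b) = some v → v = pvD s1 s2 a b) := by
  intro n
  induction n with
  | zero =>
    intro i j memo hn hinv
    have hi : i = 0 := by omega
    subst hi
    rw [pvMemoD]
    simp only [if_pos rfl]
    exact ⟨(pvD_zero_left s1 s2 j).symm, hinv⟩
  | succ n ih =>
    intro i j memo hn hinv
    by_cases hi : i = 0
    · subst hi
      rw [pvMemoD]
      simp only [if_pos rfl]
      exact ⟨(pvD_zero_left s1 s2 j).symm, hinv⟩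
    · by_cases hj : j = 0
      · subst hj
        rw [pvMemoD]
        simp only [if_neg hi, if_pos rfl]
        exact ⟨(pvD_zero_right s1 s2 i).symm, hinv⟩
      · rw [pvMemoD]
        simp only [if_neg hi, if_neg hj]
        cases hmem : memo.get? (i, j) with
        | some v =>
          simp only
          exact ⟨hinv i j v hmem, hinv⟩
        | none =>
          simp only
          obtain ⟨e1, inv1⟩ := ih (i-1) j memo (by omega) hinv
          obtain ⟨e2, inv2⟩ := ih i (j-1) _ (by omega) inv1
          obtain ⟨e3, inv3⟩ := ih (i-1) (j-1) _ (by omega) inv2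
          have hval : (if s1.getD (i-1) ' ' = s2.getD (j-1) ' '
              then min (min (pvMemoD s1 s2 (i-1) j memo).1
                            (pvMemoD s1 s2 i (j-1) (pvMemoD s1 s2 (i-1) j memo).2).1)
                       (pvMemoD s1 s2 (i-1) (j-1)
                         (pvMemoD s1 s2 i (j-1) (pvMemoD s1 s2 (i-1) j memo).2).2).1
              else min (min (pvMemoD s1 s2 (i-1) j memo).1
                            (pvMemoD s1 s2 i (j-1) (pvMemoD s1 s2 (i-1) j memo).2).1)
                       (pvMemoD s1 s2 (i-1) (j-1)
                         (pvMemoD s1 s2 i (j-1) (pvMemoD s1 s2 (i-1) j memo).2).2).1 + 1)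
              = pvD s1 s2 i j := by
            rw [e1, e2, e3]
            have hij : i = (i-1)+1 ∧ j = (j-1)+1 := by omega
            conv_rhs => rw [hij.1, hij.2, pvD_succ_succ]
            rw [← hij.1, ← hij.2]
          refine ⟨hval, ?_⟩
          intro a b v hget
          rw [PySem.Dict.get?_insert] at hget
          by_cases hk : (a, b) = (i, j)
          · rw [if_pos hk] at hget
            cases hget
            have : (a, b) = (i, j) := hk
            rw [Prod.mk.injEq] at this
            rw [this.1, this.2, hval]
          · rw [if_neg hk] at hget
            exact inv3 a b v hget

theorem pvB_eq (string1 string2 : String) :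
    lvsh_dynamic_alt string1 string2
      = pvD string1.toList string2.toList
          (min string1.toList.length string2.toList.length)
          (min string1.toList.length string2.toList.length)
        + |(string1.toList.length : Int) - (string2.toList.length : Int)| := by
  simp only [lvsh_dynamic_alt]
  congr 1
  have hempty : ∀ a b v, (PySem.Dict.empty : PySem.Dict (Nat × Nat) Int).get? (a, b) = some v
      → v = pvD string1.toList string2.toList a b := by
    intro a b v h
    rw [PySem.Dict.get?_empty] at h
    cases h
  exact (pvMemoD_sound string1.toList string2.toList
    (min string1.toList.length string2.toList.length + min string1.toList.length string2.toList.length)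
    _ _ _ le_rfl hempty).1

-- ===== VERDICT (by name: the statement is the Claim_ definition above) =====
theorem lvsh_dynamic_spec : Claim_equal_lvsh_dynamic := by
  intro string1 string2 _
  unfold Spec_lvsh_dynamic
  rw [pvA_eq, pvB_eq]
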